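-- pv_equiv track=rewrite | github.com/C-mirrors/SmartDoc | Smartdoc.py | preChange
-- ===== SOURCE A (Python) =====
-- def preChange(text):
--     #将text以行为单位加上<li></li>标签
--     lines = text.split('\n')
--     i = 0
--     for line in lines:
--         lines[i] = '<li>' + line + '</li>'
--         i += 1
--     text = ''.join(lines)
--     return text
-- ===== SOURCE B (Python) =====
-- def preChange(text):
--     # Closed form: one replace inserts the inter-line tags, outer tags concatenated.
--     return '<li>' + text.replace('\n', '</li><li>') + '</li>'
-- ===== Notes on version B (the rewrite author's own statement) =====
-- stated objective: idiomatic
-- what changed: Replaces the split / indexed mutation loop / join pipeline with a single closed-form string replacement: each newline is substituted by a closing-plus-opening tag pair and the outer tags are concatenated once.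
import Mathlib
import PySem

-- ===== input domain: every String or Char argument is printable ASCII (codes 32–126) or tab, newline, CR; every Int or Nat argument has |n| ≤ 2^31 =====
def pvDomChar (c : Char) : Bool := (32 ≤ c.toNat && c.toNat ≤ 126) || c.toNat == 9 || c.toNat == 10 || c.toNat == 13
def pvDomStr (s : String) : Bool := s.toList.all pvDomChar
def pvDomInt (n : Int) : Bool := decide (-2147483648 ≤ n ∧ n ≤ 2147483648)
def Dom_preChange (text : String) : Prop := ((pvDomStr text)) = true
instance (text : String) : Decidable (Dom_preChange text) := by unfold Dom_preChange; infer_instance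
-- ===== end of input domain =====

-- B replaces A's split / indexed mutation loop / join pipeline with a single
-- closed-form string replacement plus outer-tag concatenation (idiomatic; same cost).

-- ===== PORT A =====
-- lines = text.split('\n'); i = 0; for line in lines: lines[i] = '<li>'+line+'</li>'; i += 1; return ''.join(lines)
def preChange (text : String) : String :=
  let lines : List String := (PySem.Str.split? text "\n").getD []
  let final : Nat × List String :=
    lines.foldl (fun st line => (st.1 + 1, st.2.set st.1 ("<li>" ++ line ++ "</li>"))) (0, lines)
  PySem.Str.join "" final.2

-- ===== PORT B =====
def preChange_alt (text : String) : String :=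
  "<li>" ++ PySem.Str.replace text "\n" "</li><li>" ++ "</li>"

-- ===== PRECONDITION & SPEC =====
def Spec_preChange (text : String) (out : String) : Prop := out = preChange_alt text
instance (text : String) (out : String) : Decidable (Spec_preChange text out) := by unfold Spec_preChange; infer_instance

-- ===== CLAIM (what is proved, stated in full; the proofs are below) =====
def Claim_equal_preChange : Prop := ∀ (text : String), Dom_preChange text → Spec_preChange text (preChange text)

-- ===== LEMMAS AND PROOFS =====

-- A's loop: setting every index i to the wrapped element is List.map of the wrap.
theorem pv_setloop (f : String → String) :
    ∀ (l done : List String),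
      l.foldl (fun (st : Nat × List String) line => (st.1 + 1, st.2.set st.1 (f line)))
        (done.length, done.map f ++ l) = (done.length + l.length, done.map f ++ l.map f) := by
  intro l
  induction l with
  | nil => intro done; simp
  | cons x xs ih =>
    intro done
    have hset : (done.map f ++ x :: xs).set done.length (f x) = (done.map f ++ [f x]) ++ xs := by
      rw [List.set_append_right _ _ (by simp)]
      simp
    have := ih (done ++ [x])
    simp only [List.foldl_cons, hset]
    simpa [List.length_append, Nat.add_assoc, Nat.add_comm 1 xs.length] using this

-- splitOn.go accumulates: the acc argument is just prepended (reversed).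
theorem pv_splitOn_go_acc (sep : List Char) :
    ∀ (fuel : Nat) (l cur : List Char) (acc : List (List Char)),
      PySem.Chars.splitOn.go sep fuel l cur acc
        = acc.reverse ++ PySem.Chars.splitOn.go sep fuel l cur [] := by
  intro fuel
  induction fuel with
  | zero => intro l cur acc; simp [PySem.Chars.splitOn.go]
  | succ n ih =>
    intro l cur acc
    cases l with
    | nil => simp [PySem.Chars.splitOn.go]
    | cons c t =>
      simp only [PySem.Chars.splitOn.go]
      split
      · rw [ih _ _ (cur.reverse :: acc), ih _ _ (cur.reverse :: [])]
        simp
      · exact ih _ _ acc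

-- splitOn.go never returns the empty list.
theorem pv_splitOn_go_ne_nil (sep : List Char) :
    ∀ (fuel : Nat) (l cur : List Char), PySem.Chars.splitOn.go sep fuel l cur [] ≠ [] := by
  intro fuel
  induction fuel with
  | zero => intro l cur; simp [PySem.Chars.splitOn.go]
  | succ n ih =>
    intro l cur
    cases l with
    | nil => simp [PySem.Chars.splitOn.go]
    | cons c t =>
      simp only [PySem.Chars.splitOn.go]
      split
      · rw [pv_splitOn_go_acc]
        simp
      · exact ih _ _

-- replace.go accumulates: the acc argument is just prepended (reversed).
theorem pv_replace_go_acc (old new : List Char) :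
    ∀ (fuel : Nat) (l acc : List Char),
      PySem.Chars.replace.go old new fuel l acc
        = acc.reverse ++ PySem.Chars.replace.go old new fuel l [] := by
  intro fuel
  induction fuel with
  | zero => intro l acc; simp [PySem.Chars.replace.go]
  | succ n ih =>
    intro l acc
    cases l with
    | nil => simp [PySem.Chars.replace.go]
    | cons c t =>
      simp only [PySem.Chars.replace.go]
      split
      · rw [ih _ (new.reverse ++ acc), ih _ (new.reverse ++ [])]
        simp
      · rw [ih _ (c :: acc), ih _ (c :: [])]
        simp

-- replace.go is fuel-stable once fuel ≥ length of the remaining list.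
theorem pv_replace_go_fuel (old new : List Char) (hold : old ≠ []) :
    ∀ (fuel : Nat) (l acc : List Char), l.length ≤ fuel →
      PySem.Chars.replace.go old new (fuel + 1) l acc
        = PySem.Chars.replace.go old new fuel l acc := by
  intro fuel
  induction fuel with
  | zero =>
    intro l acc h
    have : l = [] := List.eq_nil_of_length_eq_zero (Nat.le_zero.mp h)
    subst this
    simp [PySem.Chars.replace.go]
  | succ n ih =>
    intro l acc h
    cases l with
    | nil => simp [PySem.Chars.replace.go]
    | cons c t =>
      simp only [PySem.Chars.replace.go]
      split
      · rename_i hpre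
        apply ih
        have hlen : 1 ≤ old.length := by
          cases old with
          | nil => exact absurd rfl hold
          | cons _ _ => simp
        have := List.IsPrefix.length_le (List.isPrefixOf_iff_prefix.mp hpre)
        simp only [List.length_drop]
        simp only [List.length_cons] at h this ⊢
        omega
      · apply ih
        simp only [List.length_cons] at h
        omega

-- The heart: joining the splitOn pieces with `new` is exactly replace.
theorem pv_join_splitOn_go (old new : List Char) :
    ∀ (fuel : Nat) (l cur : List Char),
      PySem.Chars.join new (PySem.Chars.splitOn.go old fuel l cur [])
        = cur.reverse ++ PySem.Chars.replace.go old new fuel l [] := by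
  intro fuel
  induction fuel with
  | zero =>
    intro l cur
    simp [PySem.Chars.splitOn.go, PySem.Chars.replace.go, PySem.Chars.join, List.intercalate]
  | succ n ih =>
    intro l cur
    cases l with
    | nil =>
      simp [PySem.Chars.splitOn.go, PySem.Chars.replace.go, PySem.Chars.join, List.intercalate]
    | cons c t =>
      simp only [PySem.Chars.splitOn.go, PySem.Chars.replace.go]
      split
      · rw [pv_splitOn_go_acc]
        have hne := pv_splitOn_go_ne_nil old n (List.drop old.length (c :: t)) []
        simp only [List.reverse_cons, List.reverse_nil, List.nil_append]
        rw [show ([cur.reverse] : List (List Char)) ++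
              PySem.Chars.splitOn.go old n (List.drop old.length (c :: t)) [] []
            = cur.reverse :: PySem.Chars.splitOn.go old n (List.drop old.length (c :: t)) [] [] from rfl]
        have hjoin : PySem.Chars.join new
              (cur.reverse :: PySem.Chars.splitOn.go old n (List.drop old.length (c :: t)) [] [])
            = cur.reverse ++ new ++
              PySem.Chars.join new (PySem.Chars.splitOn.go old n (List.drop old.length (c :: t)) [] []) := by
          cases hgo : PySem.Chars.splitOn.go old n (List.drop old.length (c :: t)) [] [] with
          | nil => exact absurd hgo hne
          | cons y ys => simp [PySem.Chars.join, List.intercalate]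
        rw [hjoin, ih _ []]
        rw [pv_replace_go_acc old new n _ (new.reverse ++ [])]
        simp
      · rw [ih t (c :: cur), pv_replace_go_acc old new n t (c :: [])]
        simp

-- replace = join new ∘ splitOn, for a nonempty pattern.
theorem pv_replace_eq_join_splitOn (s old new : List Char) (hold : old ≠ []) :
    PySem.Chars.replace s old new = PySem.Chars.join new (PySem.Chars.splitOn s old) := by
  unfold PySem.Chars.replace PySem.Chars.splitOn
  rw [if_neg (by simpa using hold)]
  rw [pv_join_splitOn_go old new (s.length + 1) s []]
  rw [pv_replace_go_fuel old new hold s.length s [] le_rfl]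
  simp

-- ''.join of the wrapped pieces = '<li>' ++ (sep-join of the pieces) ++ '</li>', pieces ≠ [].
theorem pv_join_wrap (li close : List Char) :
    ∀ (ps : List (List Char)), ps ≠ [] →
      PySem.Chars.join [] (ps.map (fun p => li ++ p ++ close))
        = li ++ PySem.Chars.join (close ++ li) ps ++ close := by
  intro ps
  induction ps with
  | nil => intro h; exact absurd rfl h
  | cons x xs ih =>
    intro _
    cases xs with
    | nil => simp [PySem.Chars.join, List.intercalate]
    | cons y ys =>
      have := ih (by simp)
      simp only [List.map_cons, PySem.Chars.join, List.intercalate, List.intersperse,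
        List.flatten_cons, List.nil_append] at this ⊢
      rw [this]
      simp

-- ===== VERDICT (by name: the statement is the Claim_ definition above) =====
theorem preChange_spec : Claim_equal_preChange := by
  intro text _
  unfold Spec_preChange preChange preChange_alt
  simp only [PySem.Str.split?, PySem.Chars.split?]
  rw [if_neg (by decide)]
  simp only [Option.map_some, Option.getD_some]
  set ps := PySem.Chars.splitOn text.toList "\n".toList with hps
  have hpsne : ps ≠ [] := by
    rw [hps]
    unfold PySem.Chars.splitOn
    exact fun h => pv_splitOn_go_ne_nil "\n".toList (text.toList.length + 1) text.toList [] (by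
      rw [pv_splitOn_go_acc] at h; simpa using h)
  -- A's fold is a map
  have hfold := pv_setloop (fun line => "<li>" ++ line ++ "</li>") (ps.map String.ofList) []
  simp only [List.length_nil, List.map_nil, List.nil_append, Nat.zero_add] at hfold
  rw [hfold]
  apply String.toList_inj.mp
  simp only [PySem.Str.join, PySem.Str.replace, String.toList_ofList, String.toList_append]
  rw [pv_replace_eq_join_splitOn text.toList "\n".toList "</li><li>".toList (by decide)]
  rw [← hps]
  have : (ps.map String.ofList).map (fun line => "<li>" ++ line ++ "</li>")
        = ps.map (fun p => String.ofList ("<li>".toList ++ p ++ "</li>".toList)) := by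
    simp only [List.map_map]
    apply List.map_congr_left
    intro p _
    apply String.toList_inj.mp
    simp
  rw [this]
  simp only [List.map_map]
  have hmaps : (ps.map (fun p => String.ofList ("<li>".toList ++ p ++ "</li>".toList))).map String.toList
      = ps.map (fun p => "<li>".toList ++ p ++ "</li>".toList) := by
    simp [List.map_map, Function.comp]
  rw [Function.comp_def]
  simp only [String.toList_ofList]
  have := pv_join_wrap "<li>".toList "</li>".toList ps hpsne
  rw [show ("".toList : List Char) = [] from rfl, this]
  have : ("</li>".toList ++ "<li>".toList : List Char) = "</li><li>".toList := by decide
  rw [this]
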